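-- pv_equiv track=rewrite | github.com/JH-TT/Coding_Practice | Programmers/Implementation_P/17681.py | solution
-- ===== SOURCE A (Python) =====
-- def solution(n, arr1, arr2):
--     answer = []
--     for a, b in zip(arr1, arr2):
--         bi = bin(a|b)[2:]
--         bi = " " * (n-len(bi)) + bi
--         bi = bi.replace("1", "#")
--         bi = bi.replace("0", " ")
--         answer.append(bi)
--
--     return answer
-- ===== SOURCE B (Python) =====
-- def solution(n, arr1, arr2):
--     # table-driven: render four bits at a time from a precomputed 16-entry nibble table
--     NIBBLE = [''.join('#' if i & (1 << k) else ' ' for k in (3, 2, 1, 0)) for i in range(16)]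
--     answer = []
--     for a, b in zip(arr1, arr2):
--         v = a | b
--         parts = []
--         while v:
--             parts.append(NIBBLE[v & 15])
--             v >>= 4
--         core = ''.join(reversed(parts)).lstrip(' ')
--         answer.append(core.rjust(n))
--     return answer
-- ===== Notes on version B (the rewrite author's own statement) =====
-- stated objective: alternative
-- what changed: B renders each row four bits at a time from a precomputed 16-entry nibble table, strips the leading blank over-width and right-justifies, instead of A's bin()-string slice, manual space padding and two str.replace passes; Pre_ restricts to the puzzle's natural domain: paired entries nonnegative (on a negative OR A returns a string with a stray 'b' left over from slicing bin(-x) while B's shift loop does not terminate) and n >= 1 unless no paired row is all-zero (for n < 1 a zero row keeps A's accidental one-space width while B yields an empty string).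
-- outside the precondition, e.g. on solution(1, [-2], [0]): A returns ['b# '], B does not finish within the time limit; on solution(0, [0], [0]): A returns [' '], B returns ['']
import Mathlib
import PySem

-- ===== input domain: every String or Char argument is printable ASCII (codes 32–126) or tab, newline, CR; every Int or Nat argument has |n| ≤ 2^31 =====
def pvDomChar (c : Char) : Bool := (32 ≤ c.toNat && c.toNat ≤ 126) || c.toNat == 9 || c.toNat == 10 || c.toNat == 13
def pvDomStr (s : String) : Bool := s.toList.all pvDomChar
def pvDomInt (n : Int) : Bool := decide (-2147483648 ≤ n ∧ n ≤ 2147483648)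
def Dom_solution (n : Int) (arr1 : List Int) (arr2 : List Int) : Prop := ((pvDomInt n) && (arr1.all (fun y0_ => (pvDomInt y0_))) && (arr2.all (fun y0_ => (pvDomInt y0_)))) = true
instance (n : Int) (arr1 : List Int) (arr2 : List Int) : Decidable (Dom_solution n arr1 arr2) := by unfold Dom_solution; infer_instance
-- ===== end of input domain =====

-- B renders each row four bits at a time from a precomputed 16-entry nibble table,
-- strips the leading blank over-width and right-justifies, instead of A's bin()-string
-- slice / space padding / two str.replace passes (objective: alternative, same cost).

-- ===== PORT A =====
-- hand port of Python's bin() digit production (no PySem primitive for bin); exact: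
-- binCore accumulates the binary digits of m (MSB first) exactly as bin() prints them
def binCore (m : Nat) (acc : List Char) : List Char :=
  if h : m = 0 then acc
  else binCore (m / 2) ((if m % 2 = 1 then '1' else '0') :: acc)
decreasing_by exact Nat.div_lt_self (Nat.pos_of_ne_zero h) (by omega)

-- bin(v) as a character list: '-0b'/'0b' prefix plus digits of |v| (exact Python behaviour)
def pyBin (v : Int) : List Char :=
  (if v < 0 then ['-', '0', 'b'] else ['0', 'b']) ++
    (if v.natAbs = 0 then ['0'] else binCore v.natAbs [])

def rowA (n : Int) (a b : Int) : String :=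
  let bi0 := PySem.List.slice (pyBin (Int.lor a b)) (some 2) none      -- bin(a|b)[2:]
  let bi1 := List.replicate (n - (bi0.length : Int)).toNat ' ' ++ bi0  -- " "*(n-len(bi)) + bi
  let bi2 := PySem.Chars.replace bi1 ['1'] ['#']                       -- bi.replace("1","#")
  let bi3 := PySem.Chars.replace bi2 ['0'] [' ']                       -- bi.replace("0"," ")
  String.mk bi3

def solution (n : Int) (arr1 : List Int) (arr2 : List Int) : List String :=
  (arr1.zip arr2).map (fun p => rowA n p.1 p.2)

-- ===== PORT B =====
-- NIBBLE = [''.join('#' if i & (1 << k) else ' ' for k in (3, 2, 1, 0)) for i in range(16)]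
def nibbleTable : List (List Char) :=
  (List.range 16).map (fun i => [3, 2, 1, 0].map (fun k => if i &&& (1 <<< k) ≠ 0 then '#' else ' '))

-- while v: parts.append(NIBBLE[v & 15]); v >>= 4   (loop over the value, which Pre_
-- guarantees nonnegative — hence a Nat; Python's B does not terminate on negatives)
def nibLoop (u : Nat) (parts : List (List Char)) : List (List Char) :=
  if h : u = 0 then parts
  else nibLoop (u >>> 4) (parts ++ [nibbleTable[u &&& 15]!])
decreasing_by
  simp [Nat.shiftRight_eq_div_pow]
  exact Nat.div_lt_self (Nat.pos_of_ne_zero h) (by norm_num)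

def rowB (n : Int) (a b : Int) : String :=
  let v := Int.lor a b
  let parts := nibLoop v.toNat []
  let core := (parts.reverse.flatten).dropWhile (fun c => c == ' ')    -- ''.join(reversed(parts)).lstrip(' ')
  String.mk (List.replicate (n - (core.length : Int)).toNat ' ' ++ core)  -- core.rjust(n)

def solution_alt (n : Int) (arr1 : List Int) (arr2 : List Int) : List String :=
  (arr1.zip arr2).map (fun p => rowB n p.1 p.2)

-- ===== PRECONDITION & SPEC =====
-- Pre_ restricts to the puzzle's natural domain: every paired entry nonnegative (on a
-- negative OR value A returns a string with a stray 'b' left over from slicing bin(-x)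
-- while B's shift loop does not terminate), and n ≥ 1 unless no paired row is all-zero
-- (for n < 1 a zero row keeps A's accidental one-space width while B yields an empty string).
def Pre_solution (n : Int) (arr1 : List Int) (arr2 : List Int) : Prop :=
  (∀ p ∈ arr1.zip arr2, 0 ≤ p.1 ∧ 0 ≤ p.2) ∧
    (1 ≤ n ∨ ∀ p ∈ arr1.zip arr2, ¬(p.1 = 0 ∧ p.2 = 0))
instance (n : Int) (arr1 : List Int) (arr2 : List Int) : Decidable (Pre_solution n arr1 arr2) := by unfold Pre_solution; infer_instance

def pvWitness_solution : Int × List Int × List Int := (5, [9, 20], [30, 1])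

def Spec_solution (n : Int) (arr1 : List Int) (arr2 : List Int) (out : List String) : Prop := out = solution_alt n arr1 arr2
instance (n : Int) (arr1 : List Int) (arr2 : List Int) (out : List String) : Decidable (Spec_solution n arr1 arr2 out) := by unfold Spec_solution; infer_instance

-- ===== CLAIM (what is proved, stated in full; the proofs are below) =====
def Claim_equal_solution : Prop := ∀ (n : Int) (arr1 : List Int) (arr2 : List Int), Dom_solution n arr1 arr2 → Pre_solution n arr1 arr2 → Spec_solution n arr1 arr2 (solution n arr1 arr2)

-- ===== LEMMAS AND PROOFS =====

-- the rendered character of bit j of m, and the top-L-bit row of m (MSB first)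
def bitChar (m j : Nat) : Char := if m.testBit j then '#' else ' '
def bitRow (m L : Nat) : List Char := (List.range L).reverse.map (bitChar m)

-- single-character str.replace is a character map
lemma replace_go_single (o n' : Char) :
    ∀ (l acc : List Char) (fuel : Nat), l.length ≤ fuel →
      PySem.Chars.replace.go [o] [n'] fuel l acc
        = acc.reverse ++ l.map (fun c => if c = o then n' else c) := by
  intro l
  induction l with
  | nil =>
    intro acc fuel _
    cases fuel <;> simp [PySem.Chars.replace.go]
  | cons c t ih =>
    intro acc fuel hf
    cases fuel with
    | zero => simp at hf
    | succ f =>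
      by_cases hc : c = o
      · subst hc
        have hpre : List.isPrefixOf [c] (c :: t) = true := by
          simp [List.isPrefixOf]
        simp only [PySem.Chars.replace.go, hpre, if_true]
        rw [show List.drop [c].length (c :: t) = t from rfl,
          show [n'].reverse ++ acc = n' :: acc from rfl,
          ih (n' :: acc) f (by simpa using hf)]
        simp
      · have hpre : List.isPrefixOf [o] (c :: t) = false := by
          simp [List.isPrefixOf]
          exact fun h => hc h.symm
        simp only [PySem.Chars.replace.go, hpre, if_false, Bool.false_eq_true]
        rw [ih (c :: acc) f (by simpa using hf)]
        simp [hc]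

lemma replace_single (o n' : Char) (l : List Char) :
    PySem.Chars.replace l [o] [n'] = l.map (fun c => if c = o then n' else c) := by
  have h : PySem.Chars.replace l [o] [n'] = PySem.Chars.replace.go [o] [n'] l.length l [] := by
    simp [PySem.Chars.replace]
  rw [h, replace_go_single o n' l [] l.length le_rfl]
  simp

lemma size_div2 (m : Nat) (h : m ≠ 0) : m.size = (m / 2).size + 1 := by
  obtain ⟨t, ht⟩ : ∃ t, (m / 2).size = t := ⟨_, rfl⟩
  rw [ht]
  apply le_antisymm
  · rw [Nat.size_le]
    have h1 : m / 2 < 2 ^ t := ht ▸ Nat.size_le.mp le_rfl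
    have hp : 2 ^ (t + 1) = 2 ^ t * 2 := pow_succ 2 t
    omega
  · rw [Nat.succ_le_iff, Nat.lt_size]
    cases t with
    | zero => simpa using Nat.pos_of_ne_zero h
    | succ u =>
      have hu : 2 ^ u ≤ m / 2 := Nat.lt_size.mp (by rw [ht]; omega)
      have hp : 2 ^ (u + 1) = 2 ^ u * 2 := pow_succ 2 u
      omega

-- binCore produces exactly the bits of m, MSB first
lemma binCore_eq (m : Nat) : ∀ acc, binCore m acc =
    ((List.range m.size).reverse.map (fun j => if (m >>> j) % 2 = 1 then '1' else '0')) ++ acc := by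
  induction m using Nat.strong_induction_on with
  | _ m ih =>
    intro acc
    by_cases h : m = 0
    · subst h; simp [binCore, Nat.size_zero]
    · rw [binCore, dif_neg h,
        ih (m / 2) (Nat.div_lt_self (Nat.pos_of_ne_zero h) (by omega)),
        size_div2 m h, List.range_succ_eq_map]
      have hshift : ∀ j : Nat, m >>> (j + 1) = (m / 2) >>> j := by
        intro j
        rw [Nat.add_comm, Nat.shiftRight_add, Nat.shiftRight_one]
      simp [List.map_map, Function.comp_def, Nat.succ_eq_add_one, hshift]

-- the two replaces, composed, render a binary digit as B's bit character
lemma digit_to_bitChar (m j : Nat) :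
    (fun c => if c = '0' then ' ' else c)
      ((fun c => if c = '1' then '#' else c) (if (m >>> j) % 2 = 1 then '1' else '0'))
      = bitChar m j := by
  have ht : m.testBit j = decide (m / 2 ^ j % 2 = 1) := Nat.testBit_eq_decide_div_mod_eq
  rw [bitChar, ht, Nat.shiftRight_eq_div_pow]
  by_cases h : m / 2 ^ j % 2 = 1 <;> simp [h]

-- the accumulator of nibLoop only ever receives appends
lemma nibLoop_acc (u : Nat) : ∀ parts, nibLoop u parts = parts ++ nibLoop u [] := by
  induction u using Nat.strong_induction_on with
  | _ u ih =>
    intro parts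
    by_cases h : u = 0
    · subst h; simp [nibLoop]
    · have hlt : u >>> 4 < u := by
        rw [Nat.shiftRight_eq_div_pow]
        exact Nat.div_lt_self (Nat.pos_of_ne_zero h) (by norm_num)
      have eq1 : ∀ q, nibLoop u q = nibLoop (u >>> 4) (q ++ [nibbleTable[u &&& 15]!]) := by
        intro q
        conv_lhs => rw [nibLoop]
        simp [h]
      rw [eq1 parts, ih (u >>> 4) hlt, eq1 [], ih (u >>> 4) hlt ([] ++ [nibbleTable[u &&& 15]!])]
      simp

lemma nib_entry : ∀ w : Nat, w < 16 →
    nibbleTable[w]! = [bitChar w 3, bitChar w 2, bitChar w 1, bitChar w 0] := by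
  decide

lemma nib_entry' (u : Nat) :
    nibbleTable[u &&& 15]! = [bitChar u 3, bitChar u 2, bitChar u 1, bitChar u 0] := by
  have h16 : u &&& 15 < 16 := Nat.lt_succ_of_le (Nat.and_le_right)
  rw [nib_entry _ h16]
  have hb : ∀ j, j < 4 → bitChar (u &&& 15) j = bitChar u j := by
    intro j hj
    have h15 : (15 : Nat).testBit j = true := by
      interval_cases j <;> decide
    simp [bitChar, Nat.testBit_and, h15]
  rw [hb 3 (by omega), hb 2 (by omega), hb 1 (by omega), hb 0 (by omega)]

-- the joined reversed nibble parts are exactly the top-(4k) bit row, and 4k covers m.size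
lemma nib_main (u : Nat) :
    (nibLoop u []).reverse.flatten = bitRow u (4 * (nibLoop u []).length) ∧
      u.size ≤ 4 * (nibLoop u []).length := by
  induction u using Nat.strong_induction_on with
  | _ u ih
  =>
  by_cases h : u = 0
  · subst h; simp [nibLoop, bitRow]
  · have hlt : u >>> 4 < u := by
      rw [Nat.shiftRight_eq_div_pow]
      exact Nat.div_lt_self (Nat.pos_of_ne_zero h) (by norm_num)
    obtain ⟨ihj, ihs⟩ := ih (u >>> 4) hlt
    have hstep : nibLoop u [] = nibbleTable[u &&& 15]! :: nibLoop (u >>> 4) [] := by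
      conv_lhs => rw [nibLoop]
      simp only [dif_neg h, List.nil_append]
      rw [nibLoop_acc]
      simp
    set k := (nibLoop (u >>> 4) []).length with hk
    have hlen : (nibLoop u []).length = k + 1 := by rw [hstep]; simp [hk]
    have hshift : ∀ j : Nat, bitChar u (4 + j) = bitChar (u >>> 4) j := by
      intro j
      simp [bitChar, Nat.testBit_shiftRight]
    have hr : bitRow u (4 + 4 * k)
        = bitRow (u >>> 4) (4 * k) ++ [bitChar u 3, bitChar u 2, bitChar u 1, bitChar u 0] := by
      rw [bitRow, List.range_add, List.reverse_append, List.map_append]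
      congr 1
      rw [← List.map_reverse, List.map_map]
      exact List.map_congr_left (fun j _ => hshift j)
    constructor
    · rw [hlen, hstep]
      have h4 : 4 * (k + 1) = 4 + 4 * k := by ring
      rw [h4, hr, nib_entry']
      simp [ihj]
    · have hub : u >>> 4 < 2 ^ (u >>> 4).size := Nat.lt_size_self _
      have hdm := Nat.div_add_mod u 16
      have hmod : u % 16 < 16 := Nat.mod_lt _ (by omega)
      have hdiv : u >>> 4 = u / 16 := by
        rw [Nat.shiftRight_eq_div_pow]
      have hpow : (2 : Nat) ^ ((u >>> 4).size + 4) = 2 ^ (u >>> 4).size * 16 := by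
        rw [pow_add]; norm_num
      have hsz : u.size ≤ (u >>> 4).size + 4 := Nat.size_le.mpr (by omega)
      omega

-- dropping leading blanks from any covering bit row leaves exactly the m.size-wide row
lemma dropWhile_bitRow (m : Nat) (hm : m ≠ 0) :
    ∀ L, m.size ≤ L → (bitRow m L).dropWhile (fun c => c == ' ') = bitRow m m.size := by
  intro L
  induction L with
  | zero =>
    intro hL
    have : m < 1 := by simpa using Nat.size_le.mp hL
    omega
  | succ k ih =>
    intro hL
    have hrow : bitRow m (k + 1) = bitChar m k :: bitRow m k := by
      rw [bitRow, List.range_succ]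
      simp [bitRow]
    by_cases hs : m.size ≤ k
    · have hbit : m.testBit k = false :=
        Nat.testBit_eq_false_of_lt (lt_of_lt_of_le (Nat.lt_size_self m) (Nat.pow_le_pow_right (by omega) hs))
      rw [hrow]
      have : bitChar m k = ' ' := by simp [bitChar, hbit]
      rw [this]
      simpa using ih hs
    · have hsk : m.size = k + 1 := by omega
      have h1 : 2 ^ k ≤ m := Nat.lt_size.mp (by omega)
      have h2 : m < 2 ^ (k + 1) := Nat.size_le.mp (le_of_eq hsk)
      have hdiv : m / 2 ^ k = 1 := by
        have hp : 2 ^ (k + 1) = 2 ^ k * 2 := pow_succ 2 k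
        have hpos : 0 < 2 ^ k := Nat.pow_pos (by omega)
        have hlo : 1 ≤ m / 2 ^ k := (Nat.le_div_iff_mul_le hpos).mpr (by omega)
        have hhi : m / 2 ^ k < 2 := Nat.div_lt_of_lt_mul (by omega)
        omega
      have hbit : m.testBit k = true := by
        rw [Nat.testBit_eq_decide_div_mod_eq, hdiv]
        decide
      have hch : bitChar m k = '#' := by simp [bitChar, hbit]
      rw [hsk, hrow, hch]
      simp [List.dropWhile]

lemma row_eq (n a b : Int) (ha : 0 ≤ a) (hb : 0 ≤ b)
    (hn : 1 ≤ n ∨ ¬(a = 0 ∧ b = 0)) :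
    rowA n a b = rowB n a b := by
  obtain ⟨ma, rfl⟩ := Int.eq_ofNat_of_zero_le ha
  obtain ⟨mb, rfl⟩ := Int.eq_ofNat_of_zero_le hb
  simp only [rowA, rowB]
  have hlor : Int.lor (↑ma) (↑mb) = ((↑(ma ||| mb) : Int)) := rfl
  rw [hlor]
  set m : Nat := ma ||| mb with hm
  have hneg : ¬ ((↑m : Int) < 0) := by omega
  have habs : ((↑m : Int)).natAbs = m := rfl
  have htoNat : ((↑m : Int)).toNat = m := rfl
  set s : Nat := if m = 0 then 1 else m.size with hs
  have hdig : PySem.List.slice (pyBin (↑m)) (some 2) none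
      = (List.range s).reverse.map (fun j => if (m >>> j) % 2 = 1 then '1' else '0') := by
    rw [PySem.List.slice_from _ (by norm_num : (0 : Int) ≤ 2)]
    by_cases h0 : m = 0
    · simp [pyBin, hneg, habs, h0, hs, List.range_one]
    · simp [pyBin, hneg, habs, h0, hs, binCore_eq m []]
  rw [hdig, replace_single, replace_single, htoNat]
  have hAdig : (((List.range s).reverse.map (fun j => if (m >>> j) % 2 = 1 then '1' else '0')).map
        (fun c => if c = '1' then '#' else c)).map (fun c => if c = '0' then ' ' else c)
      = bitRow m s := by
    rw [List.map_map, List.map_map, bitRow]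
    exact List.map_congr_left (fun j _ => digit_to_bitChar m j)
  by_cases h0 : m = 0
  · have hzz : ma = 0 ∧ mb = 0 := by
      have h' : ma ||| mb = 0 := hm.symm.trans h0
      have h1 : ma ≤ ma ||| mb := Nat.left_le_or
      have h2 : mb ≤ ma ||| mb := Nat.right_le_or
      omega
    have hn1' : 1 ≤ n := by
      rcases hn with h | h
      · exact h
      · exact absurd ⟨by simp [hzz.1], by simp [hzz.2]⟩ h
    have hnib : nibLoop m [] = [] := by rw [h0]; rw [nibLoop]; simp
    have hrow0 : bitRow m s = [' '] := by
      rw [hs, h0]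
      decide
    rw [hnib]
    simp only [List.reverse_nil, List.flatten_nil, List.dropWhile_nil, List.length_nil,
      List.append_nil, List.map_append, hAdig, hrow0, Nat.cast_zero, sub_zero]
    have hlen : ((List.range s).reverse.map (fun j => if (m >>> j) % 2 = 1 then '1' else '0')).length = s := by
      simp
    rw [hlen]
    have hsp : ∀ (L : Nat), ((List.replicate L ' ').map (fun c => if c = '1' then '#' else c)).map
        (fun c => if c = '0' then ' ' else c) = List.replicate L ' ' := by
      intro L
      simp [List.map_replicate]
    rw [hsp]
    have hs1 : s = 1 := by rw [hs, if_pos h0]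
    have hn1 : (n - (s : Int)).toNat + 1 = n.toNat := by
      rw [hs1]
      omega
    rw [← List.replicate_succ', hn1]
  · have hcore : (nibLoop m []).reverse.flatten.dropWhile (fun c => c == ' ') = bitRow m m.size := by
      rw [(nib_main m).1]
      exact dropWhile_bitRow m h0 _ (nib_main m).2
    have hss : s = m.size := by rw [hs, if_neg h0]
    rw [hcore]
    simp only [List.map_append, hAdig]
    have hlen1 : ((List.range s).reverse.map (fun j => if (m >>> j) % 2 = 1 then '1' else '0')).length = s := by
      simp
    have hlen2 : (bitRow m m.size).length = m.size := by simp [bitRow]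
    rw [hlen1, hlen2, hss]
    have hsp : ∀ (L : Nat), ((List.replicate L ' ').map (fun c => if c = '1' then '#' else c)).map
        (fun c => if c = '0' then ' ' else c) = List.replicate L ' ' := by
      intro L
      simp [List.map_replicate]
    rw [hsp]

-- ===== VERDICT (by name: the statement is the Claim_ definition above) =====
theorem solution_spec : Claim_equal_solution := by
  intro n arr1 arr2 _ hpre
  obtain ⟨hpair, hn⟩ := hpre
  unfold Spec_solution solution solution_alt
  exact List.map_congr_left (fun p hp =>
    row_eq n p.1 p.2 (hpair p hp).1 (hpair p hp).2 (hn.imp id (fun h => h p hp)))
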